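-- pv_equiv track=rewrite | github.com/Jinjas/thesis-project | src/python/add_ingredient.py | add_ingredient_lines
-- ===== SOURCE A (Python) =====
-- def add_ingredient_lines(onto_text: str, ingredient_name: str, ingredient_type: str) -> str:
--     lines = onto_text.splitlines()
--     result = []
--     conceptsHolder = []
--
--     in_zone1 = False
--     in_zone2 = False
--     cocktail_name = lines[0].strip().split()[1]
--
--     for line in lines:
--         stripped = line.lstrip()
--
--         if stripped.startswith("concepts"):
--             in_zone1 = True
--             result.append(line)
--             continue
--
--         if in_zone1 and stripped.startswith("}"):
--             in_zone1 = False
--             if not result[-2].rstrip().endswith(",") and not result[-2].lstrip().startswith("concepts"):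
--                 result[-2] = result[-2] + ","
--             result.extend(conceptsHolder)
--             result.append(line)
--             conceptsHolder = []
--             continue
--         if in_zone1:
--             if ingredient_type not in stripped:
--                 if stripped.startswith("%"):
--                     conceptsHolder.append(line)
--                     continue
--                 else:
--                     result.append(line)
--                     continue
--             else:
--                 if stripped.startswith("%"):
--                     idx = line.index("%")
--                     line = line[:idx] + line[idx + 1 :]
--                 result.append(line)
--                 continue
--         if stripped.startswith("individuals"):
--             result.append(line)
--             result.append(f"    {ingredient_name},")
--             continue
--         if stripped.startswith("triples"):
--             in_zone2 = True
--             result.append(line)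
--             result.append(f"    {ingredient_name} = iof => {ingredient_type};")
--             continue
--         if in_zone2 and stripped.startswith("}"):
--             in_zone2 = False
--             result.append(f"    {cocktail_name}Cocktail = is_composed_of => {ingredient_name};")
--             result.append(line)
--             continue
--         result.append(line)
--
--
--
--     return "\n".join(result)
-- ===== SOURCE B (Python) =====
-- def _process_block(block, ingredient_type):
--     # classify the interior of a concepts zone into kept lines (with the
--     # leading '%' removed when the line mentions ingredient_type) and held '%'-lines
--     kept, held = [], []
--     for line in block:
--         s = line.lstrip()
--         if s.startswith("concepts") or ingredient_type in s:
--             if s.startswith("%"):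
--                 w = len(line) - len(s)
--                 line = line[:w] + line[w + 1:]
--             kept.append(line)
--         elif s.startswith("%"):
--             held.append(line)
--         else:
--             kept.append(line)
--     return kept, held
--
--
-- def _fix_penult(out):
--     # append a comma to the second-to-last line unless it already ends with one
--     # or is the concepts keyword line
--     p = out[-2]
--     if not p.rstrip().endswith(",") and not p.lstrip().startswith("concepts"):
--         out = out[:-2] + [p + ","] + out[-1:]
--     return out
--
--
-- def add_ingredient_lines(onto_text: str, ingredient_name: str, ingredient_type: str) -> str:
--     lines = onto_text.splitlines()
--     cocktail_name = lines[0].strip().split()[1]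
--     out = []
--     i, n = 0, len(lines)
--     in_triples = False
--     while i < n:
--         line = lines[i]
--         s = line.lstrip()
--         i += 1
--         if s.startswith("concepts"):
--             j = i
--             while j < n and not lines[j].lstrip().startswith("}"):
--                 j += 1
--             kept, held = _process_block(lines[i:j], ingredient_type)
--             if j < n:
--                 out = _fix_penult(out + [line] + kept) + held + [lines[j]]
--                 i = j + 1
--             else:
--                 out = out + [line] + kept
--                 i = j
--         elif s.startswith("individuals"):
--             out += [line, f"    {ingredient_name},"]
--         elif s.startswith("triples"):
--             in_triples = True
--             out += [line, f"    {ingredient_name} = iof => {ingredient_type};"]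
--         elif in_triples and s.startswith("}"):
--             in_triples = False
--             out += [f"    {cocktail_name}Cocktail = is_composed_of => {ingredient_name};", line]
--         else:
--             out.append(line)
--     return "\n".join(out)
-- ===== Notes on version B (the rewrite author's own statement) =====
-- stated objective: alternative
-- what changed: Replaces A's flat single-pass state machine (in_zone1/in_zone2 flags with a holder buffer threaded through every line) by a block decomposition: the loop locates each 'concepts' zone with takeWhile/dropWhile, classifies its interior into kept and held lines in one helper pass, applies the comma fix and flushes held lines when the closing brace is found, and handles the other keyword lines in a plain indexed walk.
import Mathlib
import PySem

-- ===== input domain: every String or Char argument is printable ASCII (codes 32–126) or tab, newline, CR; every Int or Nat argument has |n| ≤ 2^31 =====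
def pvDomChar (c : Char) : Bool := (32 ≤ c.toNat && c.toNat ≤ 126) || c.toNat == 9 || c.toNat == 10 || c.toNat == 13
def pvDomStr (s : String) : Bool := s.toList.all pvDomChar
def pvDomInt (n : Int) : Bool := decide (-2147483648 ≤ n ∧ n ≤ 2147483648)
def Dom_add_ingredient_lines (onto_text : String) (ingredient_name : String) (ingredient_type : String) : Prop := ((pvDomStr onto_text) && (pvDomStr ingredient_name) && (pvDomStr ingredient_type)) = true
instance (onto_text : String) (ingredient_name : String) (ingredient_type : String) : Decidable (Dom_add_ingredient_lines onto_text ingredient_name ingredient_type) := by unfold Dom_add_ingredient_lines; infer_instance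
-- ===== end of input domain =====

-- B re-implements A's flat state-machine loop as a block decomposition: the interior of a
-- 'concepts' zone is located by takeWhile/dropWhile and classified in one helper pass;
-- equivalence is about the return value only (neither program mutates its arguments).

-- ===== PORT A =====

-- A's in-place comma fix on result[-2] (reads, tests, writes back)
def pvFixA (res : List (List Char)) : List (List Char) :=
  let p := PySem.List.pyGetD res (-2) []
  if !(PySem.Chars.endswith (PySem.Chars.rstrip p) [',']) &&
     !(PySem.Chars.startswith (PySem.Chars.lstrip p) "concepts".toList) then
    PySem.List.pySetD res (-2) (p ++ [','])
  else res

-- one iteration of A's for-loop; state = (result, conceptsHolder, in_zone1, in_zone2)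
def pvStepA (name ty cocktail : List Char)
    (st : List (List Char) × List (List Char) × Bool × Bool) (line : List Char) :
    List (List Char) × List (List Char) × Bool × Bool :=
  let res := st.1; let hold := st.2.1; let z1 := st.2.2.1; let z2 := st.2.2.2
  let s := PySem.Chars.lstrip line
  if PySem.Chars.startswith s "concepts".toList then (res ++ [line], hold, true, z2)
  else if z1 && PySem.Chars.startswith s "}".toList then
    (pvFixA res ++ hold ++ [line], [], false, z2)
  else if z1 then
    if !(PySem.Chars.isIn ty s) then
      if PySem.Chars.startswith s "%".toList then (res, hold ++ [line], z1, z2)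
      else (res ++ [line], hold, z1, z2)
    else
      let line' := if PySem.Chars.startswith s "%".toList then
          let idx := PySem.Chars.find line "%".toList
          PySem.List.slice line none (some idx) ++ PySem.List.slice line (some (idx + 1)) none
        else line
      (res ++ [line'], hold, z1, z2)
  else if PySem.Chars.startswith s "individuals".toList then
    (res ++ [line, "    ".toList ++ name ++ [',']], hold, z1, z2)
  else if PySem.Chars.startswith s "triples".toList then
    (res ++ [line, "    ".toList ++ name ++ " = iof => ".toList ++ ty ++ [';']], hold, z1, true)
  else if z2 && PySem.Chars.startswith s "}".toList then
    (res ++ ["    ".toList ++ cocktail ++ "Cocktail = is_composed_of => ".toList ++ name ++ [';'], line], hold, z1, false)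
  else (res ++ [line], hold, z1, z2)

def add_ingredient_lines (onto_text : String) (ingredient_name : String) (ingredient_type : String) : String :=
  let lines := PySem.Chars.splitlines onto_text.toList
  let cocktail := PySem.List.pyGetD (PySem.Chars.split₀ (PySem.Chars.strip (lines.headD []))) 1 []
  let fin := lines.foldl (pvStepA ingredient_name.toList ingredient_type.toList cocktail) ([], [], false, false)
  String.mk (PySem.Chars.join ['\n'] fin.1)

-- ===== PORT B =====

-- one iteration of B's _process_block classification loop
def altStep (ty : List Char) (kh : List (List Char) × List (List Char)) (line : List Char) :
    List (List Char) × List (List Char) :=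
  let s := PySem.Chars.lstrip line
  if PySem.Chars.startswith s "concepts".toList || PySem.Chars.isIn ty s then
    let line := if PySem.Chars.startswith s "%".toList then
        let w := line.length - s.length
        line.take w ++ line.drop (w + 1)
      else line
    (kh.1 ++ [line], kh.2)
  else if PySem.Chars.startswith s "%".toList then (kh.1, kh.2 ++ [line])
  else (kh.1 ++ [line], kh.2)

-- classify a concepts-block interior into (kept, held) in one pass (B's _process_block)
def altBlock (ty : List Char) (block : List (List Char)) : List (List Char) × List (List Char) :=
  block.foldl (altStep ty) ([], [])

-- B's _fix_penult: rebuild around the second-to-last element with slices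
def altFix (out : List (List Char)) : List (List Char) :=
  let p := PySem.List.pyGetD out (-2) []
  if !(PySem.Chars.endswith (PySem.Chars.rstrip p) [',']) &&
     !(PySem.Chars.startswith (PySem.Chars.lstrip p) "concepts".toList) then
    PySem.List.slice out none (some (-2)) ++ [p ++ [',']] ++ PySem.List.slice out (some (-1)) none
  else out

def pvNotClose (l : List Char) : Bool := !PySem.Chars.startswith (PySem.Chars.lstrip l) "}".toList

-- B's outer while loop: consume lines, handling a whole concepts block in one step
def altLoop (name ty cocktail : List Char) :
    List (List Char) → List (List Char) → Bool → List (List Char)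
  | [], out, _ => out
  | line :: rest, out, z2 =>
    let s := PySem.Chars.lstrip line
    if PySem.Chars.startswith s "concepts".toList then
      let kh := altBlock ty (rest.takeWhile pvNotClose)
      match h : rest.dropWhile pvNotClose with
      | [] => out ++ line :: kh.1
      | close :: rest2 =>
        altLoop name ty cocktail rest2 (altFix (out ++ line :: kh.1) ++ kh.2 ++ [close]) z2
    else if PySem.Chars.startswith s "individuals".toList then
      altLoop name ty cocktail rest (out ++ [line, "    ".toList ++ name ++ [',']]) z2
    else if PySem.Chars.startswith s "triples".toList then
      altLoop name ty cocktail rest (out ++ [line, "    ".toList ++ name ++ " = iof => ".toList ++ ty ++ [';']]) true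
    else if z2 && PySem.Chars.startswith s "}".toList then
      altLoop name ty cocktail rest (out ++ ["    ".toList ++ cocktail ++ "Cocktail = is_composed_of => ".toList ++ name ++ [';'], line]) false
    else altLoop name ty cocktail rest (out ++ [line]) z2
  termination_by l _ _ => l.length
  decreasing_by
    · have h1 : (rest.dropWhile pvNotClose).length ≤ rest.length := List.length_dropWhile_le _ _
      rw [h] at h1
      simp at h1 ⊢
      omega
    all_goals simp

def add_ingredient_lines_alt (onto_text : String) (ingredient_name : String) (ingredient_type : String) : String :=
  let lines := PySem.Chars.splitlines onto_text.toList
  let cocktail := PySem.List.pyGetD (PySem.Chars.split₀ (PySem.Chars.strip (lines.headD []))) 1 []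
  String.mk (PySem.Chars.join ['\n'] (altLoop ingredient_name.toList ingredient_type.toList cocktail lines [] false))

-- ===== PRECONDITION & SPEC =====
-- Pre_ excludes exactly the inputs on which A raises IndexError: an empty text or a first
-- line with fewer than two whitespace-separated tokens (lines[0].split()[1]), and the case
-- where the first line opens a concepts zone whose interior consists only of buffered
-- '%'-lines and which is closed, so that result[-2] is read from a one-element list.
def Pre_add_ingredient_lines (onto_text : String) (ingredient_name : String) (ingredient_type : String) : Prop :=
  let lines := PySem.Chars.splitlines onto_text.toList
  lines ≠ [] ∧
  2 ≤ (PySem.Chars.split₀ (PySem.Chars.strip (lines.headD []))).length ∧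
  ¬ (PySem.Chars.startswith (PySem.Chars.lstrip (lines.headD [])) "concepts".toList = true ∧
     lines.tail.dropWhile pvNotClose ≠ [] ∧
     (lines.tail.takeWhile pvNotClose).all
       (fun l => PySem.Chars.startswith (PySem.Chars.lstrip l) "%".toList &&
                 !(PySem.Chars.isIn ingredient_type.toList (PySem.Chars.lstrip l))) = true)

instance (onto_text : String) (ingredient_name : String) (ingredient_type : String) : Decidable (Pre_add_ingredient_lines onto_text ingredient_name ingredient_type) := by unfold Pre_add_ingredient_lines; infer_instance

def pvWitness_add_ingredient_lines : String × String × String :=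
  ("cocktail Mojito {\nconcepts {\n  % rum spirit,\n  mint\n}\nindividuals {\n}\ntriples {\n}", "rum", "spirit")

def Spec_add_ingredient_lines (onto_text : String) (ingredient_name : String) (ingredient_type : String) (out : String) : Prop := out = add_ingredient_lines_alt onto_text ingredient_name ingredient_type
instance (onto_text : String) (ingredient_name : String) (ingredient_type : String) (out : String) : Decidable (Spec_add_ingredient_lines onto_text ingredient_name ingredient_type out) := by unfold Spec_add_ingredient_lines; infer_instance

-- ===== CLAIM (what is proved, stated in full; the proofs are below) =====
def Claim_equal_add_ingredient_lines : Prop := ∀ (onto_text : String) (ingredient_name : String) (ingredient_type : String), Dom_add_ingredient_lines onto_text ingredient_name ingredient_type → Pre_add_ingredient_lines onto_text ingredient_name ingredient_type → Spec_add_ingredient_lines onto_text ingredient_name ingredient_type (add_ingredient_lines onto_text ingredient_name ingredient_type)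

-- ===== LEMMAS AND PROOFS =====

-- writing back result[-2] (A) equals rebuilding with slices (B), for lists of length ≥ 2
theorem pv_set_slice (xs : List (List Char)) (h : 2 ≤ xs.length) (v : List Char) :
    PySem.List.pySetD xs (-2) v =
    PySem.List.slice xs none (some (-2)) ++ [v] ++ PySem.List.slice xs (some (-1)) none := by
  have hne : xs ≠ [] := by intro e; subst e; simp at h
  simp only [PySem.List.pySetD, PySem.List.pySet?, PySem.List.pyIdx?, PySem.List.slice,
    PySem.List.clampIdx]
  norm_num
  split_ifs <;> try omega
  rw [Option.getD_some, List.set_eq_take_append_cons_drop, show Int.toNat 2 = 2 from rfl,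
      show ((xs.length:Int) + -2).toNat = xs.length - 2 by omega,
      show ((xs.length:Int) + -1).toNat = xs.length - 1 by omega,
      show xs.length - (xs.length - 1) = 1 by omega,
      if_pos (by omega : xs.length - 2 < xs.length),
      show xs.length - 2 + 1 = xs.length - 1 by omega]
  congr 2
  exact (List.take_of_length_le (by rw [List.length_drop]; omega)).symm

theorem pv_fix_eq (out : List (List Char)) (h : 2 ≤ out.length) : pvFixA out = altFix out := by
  simp only [pvFixA, altFix]
  split_ifs with hc
  · exact pv_set_slice out h _
  · rfl

theorem pv_prefix_head {s p q : List Char} {a b : Char}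
    (ha : (a :: p) <+: s) (hb : (b :: q) <+: s) : a = b := by
  rcases ha with ⟨t, ht⟩
  rcases hb with ⟨u, hu⟩
  rw [← ht] at hu
  simp only [List.cons_append] at hu
  exact ((List.cons.injEq ..).mp hu.symm).1

theorem pv_concepts_not_pct (s : List Char)
    (h : PySem.Chars.startswith s "concepts".toList = true) :
    PySem.Chars.startswith s "%".toList = false := by
  by_contra hh
  rw [Bool.not_eq_false, PySem.Chars.startswith_iff] at hh
  rw [PySem.Chars.startswith_iff] at h
  exact absurd (pv_prefix_head (show ('c' :: "oncepts".toList) <+: s from h)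
    (show ('%' :: ([] : List Char)) <+: s from hh)) (by decide)

theorem pv_close_not_concepts (s : List Char)
    (h : PySem.Chars.startswith s "}".toList = true) :
    PySem.Chars.startswith s "concepts".toList = false := by
  by_contra hh
  rw [Bool.not_eq_false, PySem.Chars.startswith_iff] at hh
  rw [PySem.Chars.startswith_iff] at h
  exact absurd (pv_prefix_head (show ('}' :: ([] : List Char)) <+: s from h)
    (show ('c' :: "oncepts".toList) <+: s from hh)) (by decide)

-- A's index/slice removal of the first '%' equals B's arithmetic on the lstrip length
theorem pv_strip_pct_eq (line : List Char)
    (h : PySem.Chars.startswith (PySem.Chars.lstrip line) "%".toList = true) :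
    PySem.List.slice line none (some (PySem.Chars.find line "%".toList)) ++
      PySem.List.slice line (some (PySem.Chars.find line "%".toList + 1)) none =
    line.take (line.length - (PySem.Chars.lstrip line).length) ++
      line.drop (line.length - (PySem.Chars.lstrip line).length + 1) := by
  have hp : "%".toList <+: line.dropWhile PySem.Chars.isspace :=
    (PySem.Chars.startswith_iff _ _).mp h
  have hkdef : line.length - (PySem.Chars.lstrip line).length =
      (line.takeWhile PySem.Chars.isspace).length := by
    have h2 := congrArg List.length (List.takeWhile_append_dropWhile
      (p := PySem.Chars.isspace) (l := line))
    simp only [List.length_append] at h2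
    simp only [PySem.Chars.lstrip]
    omega
  set k := (line.takeWhile PySem.Chars.isspace).length with hk
  have hklen : k ≤ line.length := by
    rw [hk]; exact (List.takeWhile_prefix _).length_le
  have hdropk : line.drop k = line.dropWhile PySem.Chars.isspace := by
    conv_lhs => rw [← List.takeWhile_append_dropWhile (p := PySem.Chars.isspace) (l := line)]
    rw [hk, List.drop_left]
  have hinf : "%".toList <:+: line :=
    hp.isInfix.trans (by rw [← hdropk]; exact (List.drop_suffix k line).isInfix)
  have hf0 : 0 ≤ PySem.Chars.find line "%".toList := (PySem.Chars.find_nonneg_iff _ _).mpr hinf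
  obtain ⟨hpref, hmin⟩ := PySem.Chars.find_spec hf0
  set f := (PySem.Chars.find line "%".toList).toNat with hfdef
  have hfk : f ≤ k := by
    by_contra hlt
    rw [not_le] at hlt
    exact hmin k hlt (by rw [hdropk]; exact hp)
  have hkf : k ≤ f := by
    by_contra hlt
    rw [not_le] at hlt
    rcases hpref with ⟨t, ht⟩
    have hdropf : line.drop f = '%' :: t := by
      rw [← ht]; rfl
    have htw : line.takeWhile PySem.Chars.isspace = line.take k :=
      hk ▸ List.prefix_iff_eq_take.mp (List.takeWhile_prefix _)
    have h3 : '%' ∈ List.drop f (List.take k line) := by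
      rw [List.drop_take, hdropf]
      cases hkk : k - f with
      | zero => omega
      | succ m => simp
    have h4 : '%' ∈ line.takeWhile PySem.Chars.isspace := by
      rw [htw]
      exact List.mem_of_mem_drop h3
    exact absurd (List.mem_takeWhile_imp h4) (by decide)
  have hfk' : PySem.Chars.find line "%".toList = (k : Int) := by omega
  rw [PySem.List.slice_to _ hf0, PySem.List.slice_from _ (by omega), hfk', hkdef,
    show ((k : Int) + 1) = ((k + 1 : Nat) : Int) by push_cast; ring]
  simp

-- the accumulator of B's classification loop factors out
theorem pv_alt_acc (ty : List Char) (body : List (List Char)) (k h : List (List Char)) :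
    body.foldl (altStep ty) (k, h) =
      (k ++ (altBlock ty body).1, h ++ (altBlock ty body).2) := by
  induction body generalizing k h with
  | nil => simp [altBlock]
  | cons l body ih =>
    rw [List.foldl_cons,
      show altBlock ty (l :: body) = (l :: body).foldl (altStep ty) ([], []) from rfl,
      List.foldl_cons, ih, ih ((altStep ty ([], []) l).1) ((altStep ty ([], []) l).2)]
    simp only [altStep]
    split_ifs <;> simp

-- step equations for A's loop body
theorem pv_stepA_concepts (name ty cocktail : List Char) (res hold : List (List Char))
    (z1 z2 : Bool) (l : List Char)
    (hcon : PySem.Chars.startswith (PySem.Chars.lstrip l) "concepts".toList = true) :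
    pvStepA name ty cocktail (res, hold, z1, z2) l = (res ++ [l], hold, true, z2) := by
  dsimp only [pvStepA]
  rw [hcon]
  rfl

theorem pv_stepA_close (name ty cocktail : List Char) (res hold : List (List Char))
    (z2 : Bool) (l : List Char)
    (hcl : PySem.Chars.startswith (PySem.Chars.lstrip l) "}".toList = true) :
    pvStepA name ty cocktail (res, hold, true, z2) l =
      (pvFixA res ++ hold ++ [l], [], false, z2) := by
  dsimp only [pvStepA]
  rw [hcl, pv_close_not_concepts _ hcl]
  rfl

-- unfolding equations for B's loop
theorem pv_altLoop_concepts_close (name ty cocktail : List Char) (line close : List Char)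
    (r rest2 out : List (List Char)) (z2 : Bool)
    (hcon : PySem.Chars.startswith (PySem.Chars.lstrip line) "concepts".toList = true)
    (hdw : r.dropWhile pvNotClose = close :: rest2) :
    altLoop name ty cocktail (line :: r) out z2 =
      altLoop name ty cocktail rest2
        (altFix (out ++ line :: (altBlock ty (r.takeWhile pvNotClose)).1) ++
          (altBlock ty (r.takeWhile pvNotClose)).2 ++ [close]) z2 := by
  rw [altLoop]
  dsimp only
  rw [hcon, hdw]
  rfl

theorem pv_altLoop_concepts_nil (name ty cocktail : List Char) (line : List Char)
    (r out : List (List Char)) (z2 : Bool)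
    (hcon : PySem.Chars.startswith (PySem.Chars.lstrip line) "concepts".toList = true)
    (hdw : r.dropWhile pvNotClose = []) :
    altLoop name ty cocktail (line :: r) out z2 =
      out ++ line :: (altBlock ty (r.takeWhile pvNotClose)).1 := by
  rw [altLoop]
  dsimp only
  rw [hcon, hdw]
  rfl

theorem pv_altLoop_ind (name ty cocktail : List Char) (line : List Char)
    (r out : List (List Char)) (z2 : Bool)
    (hcon : PySem.Chars.startswith (PySem.Chars.lstrip line) "concepts".toList = false)
    (hind : PySem.Chars.startswith (PySem.Chars.lstrip line) "individuals".toList = true) :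
    altLoop name ty cocktail (line :: r) out z2 =
      altLoop name ty cocktail r (out ++ [line, "    ".toList ++ name ++ [',']]) z2 := by
  rw [altLoop]
  dsimp only
  rw [hcon, hind]
  rfl

theorem pv_altLoop_tri (name ty cocktail : List Char) (line : List Char)
    (r out : List (List Char)) (z2 : Bool)
    (hcon : PySem.Chars.startswith (PySem.Chars.lstrip line) "concepts".toList = false)
    (hind : PySem.Chars.startswith (PySem.Chars.lstrip line) "individuals".toList = false)
    (htri : PySem.Chars.startswith (PySem.Chars.lstrip line) "triples".toList = true) :
    altLoop name ty cocktail (line :: r) out z2 =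
      altLoop name ty cocktail r
        (out ++ [line, "    ".toList ++ name ++ " = iof => ".toList ++ ty ++ [';']]) true := by
  rw [altLoop]
  dsimp only
  rw [hcon, hind, htri]
  rfl

theorem pv_altLoop_z2close (name ty cocktail : List Char) (line : List Char)
    (r out : List (List Char)) (z2 : Bool)
    (hcon : PySem.Chars.startswith (PySem.Chars.lstrip line) "concepts".toList = false)
    (hind : PySem.Chars.startswith (PySem.Chars.lstrip line) "individuals".toList = false)
    (htri : PySem.Chars.startswith (PySem.Chars.lstrip line) "triples".toList = false)
    (hz : (z2 && PySem.Chars.startswith (PySem.Chars.lstrip line) "}".toList) = true) :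
    altLoop name ty cocktail (line :: r) out z2 =
      altLoop name ty cocktail r
        (out ++ ["    ".toList ++ cocktail ++ "Cocktail = is_composed_of => ".toList ++
          name ++ [';'], line]) false := by
  rw [altLoop]
  dsimp only
  rw [hcon, hind, htri, hz]
  rfl

theorem pv_altLoop_plain (name ty cocktail : List Char) (line : List Char)
    (r out : List (List Char)) (z2 : Bool)
    (hcon : PySem.Chars.startswith (PySem.Chars.lstrip line) "concepts".toList = false)
    (hind : PySem.Chars.startswith (PySem.Chars.lstrip line) "individuals".toList = false)
    (htri : PySem.Chars.startswith (PySem.Chars.lstrip line) "triples".toList = false)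
    (hz : (z2 && PySem.Chars.startswith (PySem.Chars.lstrip line) "}".toList) = false) :
    altLoop name ty cocktail (line :: r) out z2 =
      altLoop name ty cocktail r (out ++ [line]) z2 := by
  rw [altLoop]
  dsimp only
  rw [hcon, hind, htri, hz]
  rfl

-- inside zone 1, A's loop over a block of non-closing lines accumulates B's (kept, held)
theorem pv_block_eq (name ty cocktail : List Char) (body : List (List Char))
    (hb : ∀ l ∈ body, pvNotClose l = true) (res hold : List (List Char)) (z2 : Bool) :
    body.foldl (pvStepA name ty cocktail) (res, hold, true, z2) =
      (res ++ (altBlock ty body).1, hold ++ (altBlock ty body).2, true, z2) := by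
  induction body generalizing res hold with
  | nil => simp [altBlock]
  | cons l body ih =>
    have hnc : PySem.Chars.startswith (PySem.Chars.lstrip l) "}".toList = false := by
      have := hb l (by simp)
      simpa [pvNotClose] using this
    have hbody : ∀ x ∈ body, pvNotClose x = true := fun x hx => hb x (by simp [hx])
    rw [List.foldl_cons,
      show altBlock ty (l :: body) = (l :: body).foldl (altStep ty) ([], []) from rfl,
      List.foldl_cons, pv_alt_acc]
    by_cases hcon : PySem.Chars.startswith (PySem.Chars.lstrip l) "concepts".toList = true
    · have hpct := pv_concepts_not_pct _ hcon
      rw [pv_stepA_concepts name ty cocktail res hold true z2 l hcon,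
        show altStep ty ([], []) l = ([l], []) by dsimp only [altStep]; rw [hcon, hpct]; rfl,
        ih hbody]
      simp
    · rw [Bool.not_eq_true] at hcon
      by_cases hisin : PySem.Chars.isIn ty (PySem.Chars.lstrip l) = true
      · by_cases hpct : PySem.Chars.startswith (PySem.Chars.lstrip l) "%".toList = true
        · rw [show pvStepA name ty cocktail (res, hold, true, z2) l =
              (res ++ [PySem.List.slice l none (some (PySem.Chars.find l "%".toList)) ++
                PySem.List.slice l (some (PySem.Chars.find l "%".toList + 1)) none],
               hold, true, z2)
              by dsimp only [pvStepA]; rw [hcon, hnc, hisin, hpct]; rfl,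
            show altStep ty ([], []) l =
              ([l.take (l.length - (PySem.Chars.lstrip l).length) ++
                l.drop (l.length - (PySem.Chars.lstrip l).length + 1)], [])
              by dsimp only [altStep]; rw [hcon, hisin, hpct]; rfl,
            ih hbody, pv_strip_pct_eq l hpct]
          simp
        · rw [Bool.not_eq_true] at hpct
          rw [show pvStepA name ty cocktail (res, hold, true, z2) l = (res ++ [l], hold, true, z2)
              by dsimp only [pvStepA]; rw [hcon, hnc, hisin, hpct]; rfl,
            show altStep ty ([], []) l = ([l], [])
              by dsimp only [altStep]; rw [hcon, hisin, hpct]; rfl,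
            ih hbody]
          simp
      · rw [Bool.not_eq_true] at hisin
        by_cases hpct : PySem.Chars.startswith (PySem.Chars.lstrip l) "%".toList = true
        · rw [show pvStepA name ty cocktail (res, hold, true, z2) l = (res, hold ++ [l], true, z2)
              by dsimp only [pvStepA]; rw [hcon, hnc, hisin, hpct]; rfl,
            show altStep ty ([], []) l = ([], [l])
              by dsimp only [altStep]; rw [hcon, hisin, hpct]; rfl,
            ih hbody]
          simp
        · rw [Bool.not_eq_true] at hpct
          rw [show pvStepA name ty cocktail (res, hold, true, z2) l = (res ++ [l], hold, true, z2)
              by dsimp only [pvStepA]; rw [hcon, hnc, hisin, hpct]; rfl,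
            show altStep ty ([], []) l = ([l], [])
              by dsimp only [altStep]; rw [hcon, hisin, hpct]; rfl,
            ih hbody]
          simp

-- if some block line is not a buffered '%'-line, B's kept list is nonempty
theorem pv_kept_ne_nil (ty : List Char) (body : List (List Char))
    (hex : ¬ body.all (fun l => PySem.Chars.startswith (PySem.Chars.lstrip l) "%".toList &&
        !(PySem.Chars.isIn ty (PySem.Chars.lstrip l))) = true) :
    (altBlock ty body).1 ≠ [] := by
  induction body with
  | nil => simp at hex
  | cons l body ih =>
    rw [show altBlock ty (l :: body) = (l :: body).foldl (altStep ty) ([], []) from rfl,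
      List.foldl_cons,
      show altStep ty ([], []) l = ((altStep ty ([], []) l).1, (altStep ty ([], []) l).2) from rfl,
      pv_alt_acc]
    by_cases hl : (PySem.Chars.startswith (PySem.Chars.lstrip l) "%".toList &&
        !(PySem.Chars.isIn ty (PySem.Chars.lstrip l))) = true
    · have hbody : ¬ body.all (fun l => PySem.Chars.startswith (PySem.Chars.lstrip l) "%".toList &&
          !(PySem.Chars.isIn ty (PySem.Chars.lstrip l))) = true := by
        simp only [List.all_cons, hl, Bool.true_and] at hex
        exact hex
      rw [Bool.and_eq_true, Bool.not_eq_eq_eq_not, Bool.not_true] at hl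
      have hcc : PySem.Chars.startswith (PySem.Chars.lstrip l) "concepts".toList = false := by
        by_contra hc
        rw [Bool.not_eq_false] at hc
        exact absurd hl.1 (by rw [pv_concepts_not_pct _ hc]; simp)
      rw [show altStep ty ([], []) l = ([], [l])
        by dsimp only [altStep]; rw [hcc, hl.2, hl.1]; rfl]
      simpa using ih hbody
    · rw [Bool.and_eq_true, not_and_or] at hl
      have hkept : (altStep ty ([], []) l).1 ≠ [] := by
        dsimp only [altStep]
        rcases hl with hl | hl
        · rw [Bool.not_eq_true] at hl
          rw [hl]
          split_ifs <;> simp_all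
        · have hl2 : PySem.Chars.isIn ty (PySem.Chars.lstrip l) = true := by
            revert hl
            cases PySem.Chars.isIn ty (PySem.Chars.lstrip l) <;> simp
          rw [hl2]
          split_ifs <;> simp_all
      intro hcontra
      exact hkept (List.append_eq_nil_iff.mp hcontra).1

theorem pv_dropWhile_head_false {α : Type} (p : α → Bool) (l : List α) (a : α) (t : List α)
    (h : l.dropWhile p = a :: t) : p a = false := by
  induction l with
  | nil => simp at h
  | cons x xs ih =>
    rw [List.dropWhile_cons] at h
    by_cases hx : p x = true
    · rw [if_pos hx] at h
      exact ih h
    · rw [Bool.not_eq_true] at hx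
      rw [if_neg (by simp [hx])] at h
      injection h with h1 _
      subst h1
      exact hx

-- main loop correspondence: outside zone 1, A's fold equals B's loop
theorem pv_main_aux (name ty cocktail : List Char) (n : Nat) :
    ∀ (rest out : List (List Char)) (z2 : Bool), rest.length ≤ n →
    (out = [] →
      ∀ line r, rest = line :: r →
        PySem.Chars.startswith (PySem.Chars.lstrip line) "concepts".toList = true →
        ¬ (r.dropWhile pvNotClose ≠ [] ∧
           (r.takeWhile pvNotClose).all
             (fun l => PySem.Chars.startswith (PySem.Chars.lstrip l) "%".toList &&
                       !(PySem.Chars.isIn ty (PySem.Chars.lstrip l))) = true)) →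
    (rest.foldl (pvStepA name ty cocktail) (out, [], false, z2)).1 =
      altLoop name ty cocktail rest out z2 := by
  induction n with
  | zero =>
    intro rest out z2 hlen _
    rw [List.length_eq_zero_iff.mp (Nat.le_zero.mp hlen)]
    simp [altLoop]
  | succ n ih =>
    intro rest out z2 hlen hout
    match rest with
    | [] => simp [altLoop]
    | line :: r =>
      have hr : r.length ≤ n := by
        simp only [List.length_cons] at hlen
        omega
      by_cases hcon : PySem.Chars.startswith (PySem.Chars.lstrip line) "concepts".toList = true
      · -- concepts: A enters zone 1; B consumes the whole block at once
        have hb1 : ∀ l ∈ r.takeWhile pvNotClose, pvNotClose l = true :=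
          fun l hl => List.mem_takeWhile_imp hl
        have hA : (line :: r).foldl (pvStepA name ty cocktail) (out, [], false, z2) =
            (r.dropWhile pvNotClose).foldl (pvStepA name ty cocktail)
              ((out ++ [line]) ++ (altBlock ty (r.takeWhile pvNotClose)).1,
               (altBlock ty (r.takeWhile pvNotClose)).2, true, z2) := by
          rw [List.foldl_cons, pv_stepA_concepts name ty cocktail out [] false z2 line hcon]
          conv_lhs => rw [← List.takeWhile_append_dropWhile (p := pvNotClose) (l := r)]
          rw [List.foldl_append, pv_block_eq name ty cocktail _ hb1]
          simp
        rw [hA]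
        cases hdw : r.dropWhile pvNotClose with
        | nil =>
          rw [List.foldl_nil, pv_altLoop_concepts_nil name ty cocktail line r out z2 hcon hdw]
          simp
        | cons close rest2 =>
          have hcl : PySem.Chars.startswith (PySem.Chars.lstrip close) "}".toList = true := by
            have h0 := pv_dropWhile_head_false pvNotClose r close rest2 hdw
            simpa [pvNotClose] using h0
          have hlen2 : 2 ≤ ((out ++ [line]) ++ (altBlock ty (r.takeWhile pvNotClose)).1).length := by
            rcases out with _ | ⟨o, os⟩
            · have hnotall := hout rfl line r rfl hcon
              rw [not_and_or] at hnotall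
              rcases hnotall with hnotall | hnotall
              · rw [not_not] at hnotall
                rw [hnotall] at hdw
                simp at hdw
              · have hne := pv_kept_ne_nil ty (r.takeWhile pvNotClose) hnotall
                rcases hkk : (altBlock ty (r.takeWhile pvNotClose)).1 with _ | _
                · exact absurd hkk hne
                · simp
            · simp only [List.length_append, List.length_cons]
              omega
          have hrest2 : rest2.length ≤ n := by
            have h1 : (r.dropWhile pvNotClose).length ≤ r.length := List.length_dropWhile_le _ _
            rw [hdw] at h1
            simp only [List.length_cons] at h1
            omega
          rw [List.foldl_cons, pv_stepA_close name ty cocktail _ _ z2 close hcl,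
            pv_fix_eq _ hlen2,
            ih rest2 _ z2 hrest2 (by intro hcontra; simp at hcontra),
            pv_altLoop_concepts_close name ty cocktail line close r rest2 out z2 hcon hdw]
          simp
      · rw [Bool.not_eq_true] at hcon
        rw [List.foldl_cons]
        by_cases hind : PySem.Chars.startswith (PySem.Chars.lstrip line) "individuals".toList = true
        · rw [show pvStepA name ty cocktail (out, [], false, z2) line =
              (out ++ [line, "    ".toList ++ name ++ [',']], [], false, z2)
              by dsimp only [pvStepA]; rw [hcon, hind]; rfl,
            ih r _ z2 hr (by intro hcontra; simp at hcontra),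
            pv_altLoop_ind name ty cocktail line r out z2 hcon hind]
        · rw [Bool.not_eq_true] at hind
          by_cases htri : PySem.Chars.startswith (PySem.Chars.lstrip line) "triples".toList = true
          · rw [show pvStepA name ty cocktail (out, [], false, z2) line =
                (out ++ [line, "    ".toList ++ name ++ " = iof => ".toList ++ ty ++ [';']],
                 [], false, true)
                by dsimp only [pvStepA]; rw [hcon, hind, htri]; rfl,
              ih r _ true hr (by intro hcontra; simp at hcontra),
              pv_altLoop_tri name ty cocktail line r out z2 hcon hind htri]
          · rw [Bool.not_eq_true] at htri
            by_cases hz : (z2 && PySem.Chars.startswith (PySem.Chars.lstrip line) "}".toList) = true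
            · rw [show pvStepA name ty cocktail (out, [], false, z2) line =
                  (out ++ ["    ".toList ++ cocktail ++ "Cocktail = is_composed_of => ".toList ++
                    name ++ [';'], line], [], false, false)
                  by dsimp only [pvStepA]; rw [hcon, hind, htri, hz]; rfl,
                ih r _ false hr (by intro hcontra; simp at hcontra),
                pv_altLoop_z2close name ty cocktail line r out z2 hcon hind htri hz]
            · rw [Bool.not_eq_true] at hz
              rw [show pvStepA name ty cocktail (out, [], false, z2) line =
                  (out ++ [line], [], false, z2)
                  by dsimp only [pvStepA]; rw [hcon, hind, htri, hz]; rfl,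
                ih r _ z2 hr (by intro hcontra; simp at hcontra),
                pv_altLoop_plain name ty cocktail line r out z2 hcon hind htri hz]

theorem pv_main (name ty cocktail : List Char) (rest out : List (List Char)) (z2 : Bool)
    (hout : out = [] →
      ∀ line r, rest = line :: r →
        PySem.Chars.startswith (PySem.Chars.lstrip line) "concepts".toList = true →
        ¬ (r.dropWhile pvNotClose ≠ [] ∧
           (r.takeWhile pvNotClose).all
             (fun l => PySem.Chars.startswith (PySem.Chars.lstrip l) "%".toList &&
                       !(PySem.Chars.isIn ty (PySem.Chars.lstrip l))) = true)) :
    (rest.foldl (pvStepA name ty cocktail) (out, [], false, z2)).1 =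
      altLoop name ty cocktail rest out z2 :=
  pv_main_aux name ty cocktail rest.length rest out z2 le_rfl hout

-- ===== VERDICT (by name: the statement is the Claim_ definition above) =====
theorem add_ingredient_lines_spec : Claim_equal_add_ingredient_lines := by
  intro o nm ty _ hpre
  unfold Pre_add_ingredient_lines at hpre
  unfold Spec_add_ingredient_lines add_ingredient_lines add_ingredient_lines_alt
  dsimp only
  apply congrArg
  apply congrArg
  apply pv_main
  intro _ line r hlr hcon hbad
  have h3 := hpre.2.2
  rw [hlr] at h3
  simp only [List.headD_cons, List.tail_cons] at h3
  exact h3 ⟨hcon, hbad.1, hbad.2⟩
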